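-- pv_equiv track=rewrite | github.com/DhaneshKolu/Navigen-Smart_Travel_Guide | backend/app/api/plan_api.py | _vibe_match_points
-- ===== SOURCE A (Python) =====
-- def _vibe_match_points(vibes: list[str], name: str, category: str) -> int:
--     if not vibes:
--         return 12
--
--     category_l = (category or "").lower()
--     hay = f"{name or ''} {category or ''}".lower()
--     vibe_map = {
--         "Culture": ["culture", "heritage", "museum", "fort", "palace", "monument", "religious"],
--         "Nature": ["nature", "park", "lake", "beach", "waterfall", "viewpoint", "garden"],
--         "Food": ["food", "market", "bazaar", "street"],
--         "Nightlife": ["night", "lake", "road", "bazaar", "show"],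
--         "Adventure": ["adventure", "fort", "trek", "caves", "waterfall"],
--         "Leisure": ["leisure", "lake", "garden", "road", "park", "scenic"],
--         "Wellness": ["temple", "garden", "lake", "peace", "spiritual"],
--         "Shopping": ["market", "bazaar", "shopping"],
--     }
--
--     best = 0
--     for vibe in vibes:
--         keys = vibe_map.get(vibe, [vibe.lower()])
--         if any(k in hay for k in keys) or any(k in category_l for k in keys):
--             best = max(best, 25)
--         elif any(k[:4] in hay for k in keys if len(k) >= 4):
--             best = max(best, 12)
--     return best
-- ===== SOURCE B (Python) =====
-- def _vibe_match_points(vibes: list[str], name: str, category: str) -> int: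
--     if not vibes:
--         return 12
--
--     category_l = (category or "").lower()
--     hay = f"{name or ''} {category or ''}".lower()
--     vibe_map = {
--         "Culture": ["culture", "heritage", "museum", "fort", "palace", "monument", "religious"],
--         "Nature": ["nature", "park", "lake", "beach", "waterfall", "viewpoint", "garden"],
--         "Food": ["food", "market", "bazaar", "street"],
--         "Nightlife": ["night", "lake", "road", "bazaar", "show"],
--         "Adventure": ["adventure", "fort", "trek", "caves", "waterfall"],
--         "Leisure": ["leisure", "lake", "garden", "road", "park", "scenic"],
--         "Wellness": ["temple", "garden", "lake", "peace", "spiritual"],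
--         "Shopping": ["market", "bazaar", "shopping"],
--     }
--
--     # Flatten every vibe's keyword list into one stream, then do two staged
--     # scans with early return: 25 > 12 are constants, so the per-vibe best-
--     # accumulator is equivalent to "any full match anywhere, else any prefix
--     # match anywhere, else 0".
--     keys = [k for v in vibes for k in vibe_map.get(v, [v.lower()])]
--     for k in keys:
--         if k in hay or k in category_l:
--             return 25
--     for k in keys:
--         if len(k) >= 4 and k[:4] in hay:
--             return 12
--     return 0
-- ===== Notes on version B (the rewrite author's own statement) =====
-- stated objective: simpler
-- what changed: Replaces A's per-vibe best-accumulator fold (max over per-vibe nested any() tests) with one flattened keyword list and two staged early-return scans over it: return 25 at the first full match, else 12 at the first 4-char-prefix match, else 0; correct because both scores are constants with 25 > 12, and the early return stops scanning at the first match while A always examines every vibe.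
import Mathlib
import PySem

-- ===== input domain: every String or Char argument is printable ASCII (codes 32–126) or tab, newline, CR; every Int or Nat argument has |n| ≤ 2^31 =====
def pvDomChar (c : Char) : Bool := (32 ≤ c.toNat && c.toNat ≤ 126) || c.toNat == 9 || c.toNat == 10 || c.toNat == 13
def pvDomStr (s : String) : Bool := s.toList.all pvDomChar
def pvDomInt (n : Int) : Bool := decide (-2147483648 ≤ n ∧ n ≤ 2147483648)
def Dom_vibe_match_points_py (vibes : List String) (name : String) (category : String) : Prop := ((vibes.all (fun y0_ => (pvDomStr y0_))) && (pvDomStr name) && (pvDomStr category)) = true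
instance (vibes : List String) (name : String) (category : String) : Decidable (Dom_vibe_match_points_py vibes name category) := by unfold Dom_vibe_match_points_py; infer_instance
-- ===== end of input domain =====

-- B flattens every vibe's keyword list into one list and replaces A's per-vibe
-- best-accumulator fold by two staged early-return scans over that flat list
-- (first full match -> 25, else first 4-char-prefix match -> 12, else 0); simpler.

-- ===== PORT A =====
-- the vibe_map dict literal (shared: both Pythons contain the identical literal)
def pvVibeMap : PySem.Dict String (List String) := PySem.Dict.ofList [
  ("Culture", ["culture", "heritage", "museum", "fort", "palace", "monument", "religious"]),
  ("Nature", ["nature", "park", "lake", "beach", "waterfall", "viewpoint", "garden"]),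
  ("Food", ["food", "market", "bazaar", "street"]),
  ("Nightlife", ["night", "lake", "road", "bazaar", "show"]),
  ("Adventure", ["adventure", "fort", "trek", "caves", "waterfall"]),
  ("Leisure", ["leisure", "lake", "garden", "road", "park", "scenic"]),
  ("Wellness", ["temple", "garden", "lake", "peace", "spiritual"]),
  ("Shopping", ["market", "bazaar", "shopping"])]

-- vibe_map.get(vibe, [vibe.lower()])   (this expression occurs identically in both Pythons)
def pvKeys (vibe : String) : List String :=
  PySem.Dict.getD pvVibeMap vibe [PySem.Str.lower vibe]

def vibe_match_points_py (vibes : List String) (name : String) (category : String) : Int :=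
  if vibes = [] then 12
  else
    let category_l := PySem.Chars.lower category.toList
    let hay := PySem.Chars.lower (name.toList ++ ' ' :: category.toList)
    vibes.foldl (fun best vibe =>
      let keys := pvKeys vibe
      if keys.any (fun k => PySem.Chars.isIn k.toList hay) ||
         keys.any (fun k => PySem.Chars.isIn k.toList category_l) then max best 25
      else if keys.any (fun k =>
          decide (4 ≤ k.toList.length) &&
          PySem.Chars.isIn (PySem.List.slice k.toList none (some (4 : Int))) hay) then max best 12
      else best) 0

-- ===== PORT B =====
-- pass 1: 'for k in keys: if k in hay or k in category_l: return 25'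
def pvScanFull (hay category_l : List Char) : List String → Option Int
  | [] => none
  | k :: ks =>
    if PySem.Chars.isIn k.toList hay || PySem.Chars.isIn k.toList category_l then some 25
    else pvScanFull hay category_l ks

-- pass 2: 'for k in keys: if len(k) >= 4 and k[:4] in hay: return 12'
def pvScanPref (hay : List Char) : List String → Option Int
  | [] => none
  | k :: ks =>
    if decide (4 ≤ k.toList.length) &&
       PySem.Chars.isIn (PySem.List.slice k.toList none (some (4 : Int))) hay then some 12
    else pvScanPref hay ks

def vibe_match_points_py_alt (vibes : List String) (name : String) (category : String) : Int :=
  if vibes = [] then 12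
  else
    let category_l := PySem.Chars.lower category.toList
    let hay := PySem.Chars.lower (name.toList ++ ' ' :: category.toList)
    let keys := vibes.flatMap pvKeys
    match pvScanFull hay category_l keys with
    | some r => r
    | none =>
      match pvScanPref hay keys with
      | some r => r
      | none => 0

-- ===== PRECONDITION & SPEC =====
def Spec_vibe_match_points_py (vibes : List String) (name : String) (category : String) (out : Int) : Prop := out = vibe_match_points_py_alt vibes name category
instance (vibes : List String) (name : String) (category : String) (out : Int) : Decidable (Spec_vibe_match_points_py vibes name category out) := by unfold Spec_vibe_match_points_py; infer_instance

-- ===== CLAIM (what is proved, stated in full; the proofs are below) =====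
def Claim_equal_vibe_match_points_py : Prop := ∀ (vibes : List String) (name : String) (category : String), Dom_vibe_match_points_py vibes name category → Spec_vibe_match_points_py vibes name category (vibe_match_points_py vibes name category)

-- ===== LEMMAS AND PROOFS =====

-- the two per-key tests, as predicates
def pvFullTest (hay category_l : List Char) (k : String) : Bool :=
  PySem.Chars.isIn k.toList hay || PySem.Chars.isIn k.toList category_l

def pvPrefTest (hay : List Char) (k : String) : Bool :=
  decide (4 ≤ k.toList.length) &&
  PySem.Chars.isIn (PySem.List.slice k.toList none (some (4 : Int))) hay

-- B's early-return scans are existence tests over the flat key list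
theorem pvScanFull_eq (hay category_l : List Char) (l : List String) :
    pvScanFull hay category_l l = if l.any (pvFullTest hay category_l) then some 25 else none := by
  induction l with
  | nil => rfl
  | cons k ks ih =>
    rw [pvScanFull, ih]
    simp only [List.any_cons, pvFullTest]
    by_cases h : (PySem.Chars.isIn k.toList hay || PySem.Chars.isIn k.toList category_l) = true <;> simp [h]

theorem pvScanPref_eq (hay : List Char) (l : List String) :
    pvScanPref hay l = if l.any (pvPrefTest hay) then some 12 else none := by
  induction l with
  | nil => rfl
  | cons k ks ih =>
    rw [pvScanPref, ih]
    simp only [List.any_cons, pvPrefTest]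
    simp only [Bool.or_eq_true]
    split_ifs with h1 h2 h3 <;> simp_all
    rcases ‹_ ∨ _› with ⟨hl, hi⟩ | ⟨x, hx, hp⟩ <;> simp_all

-- any distributes over a pointwise 'or' of tests
theorem pvAnyOr (l : List String) (p q : String → Bool) :
    (l.any fun k => p k || q k) = (l.any p || l.any q) := by
  induction l with
  | nil => rfl
  | cons a l ih =>
    simp only [List.any_cons, ih]
    cases p a <;> cases q a <;> simp

-- A's best-accumulator fold is characterised by the two existence tests over the vibes
theorem pvFoldScore (full pref : String → Bool) (l : List String) (b : Int) :
    l.foldl (fun best v =>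
      if full v then max best 25 else if pref v then max best 12 else best) b
    = if l.any full then max b 25 else if l.any pref then max b 12 else b := by
  induction l generalizing b with
  | nil => simp
  | cons v l ih =>
    simp only [List.foldl_cons, List.any_cons, ih]
    by_cases hf : full v <;> by_cases hp : pref v <;>
      simp only [hf, hp, Bool.true_or, Bool.false_or, if_true, if_false,
        Bool.false_eq_true] <;>
      split_ifs <;> omega

-- ===== VERDICT (by name: the statement is the Claim_ definition above) =====
theorem vibe_match_points_py_spec : Claim_equal_vibe_match_points_py := by
  intro vibes name category _
  unfold Spec_vibe_match_points_py vibe_match_points_py vibe_match_points_py_alt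
  by_cases h : vibes = []
  · simp [h]
  · simp only [h, if_false]
    rw [pvScanFull_eq, pvScanPref_eq,
      pvFoldScore
        (fun vibe => ((pvKeys vibe).any fun k =>
            PySem.Chars.isIn k.toList (PySem.Chars.lower (name.toList ++ ' ' :: category.toList))) ||
          (pvKeys vibe).any fun k =>
            PySem.Chars.isIn k.toList (PySem.Chars.lower category.toList))
        (fun vibe => (pvKeys vibe).any fun k =>
          decide (4 ≤ k.toList.length) &&
          PySem.Chars.isIn (PySem.List.slice k.toList none (some (4 : Int)))
            (PySem.Chars.lower (name.toList ++ ' ' :: category.toList)))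
        vibes 0]
    have h1 : ∀ (l : List String),
        (List.flatMap pvKeys l).any (pvFullTest
            (PySem.Chars.lower (name.toList ++ ' ' :: category.toList))
            (PySem.Chars.lower category.toList))
        = l.any (fun vibe => ((pvKeys vibe).any fun k =>
            PySem.Chars.isIn k.toList (PySem.Chars.lower (name.toList ++ ' ' :: category.toList))) ||
          (pvKeys vibe).any fun k =>
            PySem.Chars.isIn k.toList (PySem.Chars.lower category.toList)) := by
      intro l
      rw [List.any_flatMap]
      congr 1
      funext v
      exact pvAnyOr (pvKeys v) _ _
    have h2 : (List.flatMap pvKeys vibes).any (pvPrefTest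
          (PySem.Chars.lower (name.toList ++ ' ' :: category.toList)))
        = vibes.any (fun vibe => (pvKeys vibe).any fun k =>
          decide (4 ≤ k.toList.length) &&
          PySem.Chars.isIn (PySem.List.slice k.toList none (some (4 : Int)))
            (PySem.Chars.lower (name.toList ++ ' ' :: category.toList))) := by
      rw [List.any_flatMap]; rfl
    rw [h1, h2]
    split_ifs <;> simp
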